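-- pv_equiv track=rewrite | github.com/tormobr/advent_of_code | day24/solution.py | get_biodiv
-- ===== SOURCE A (Python) =====
-- def get_biodiv(data):
--     index = 0
--     res = 0
--     for line in data:
--         for c in line:
--             if c == "#":
--                 res += 2 ** index
--             index += 1
--     return res
-- ===== SOURCE B (Python) =====
-- def get_biodiv(data):
--     bits = "".join("1" if c == "#" else "0" for line in data for c in line)
--     return int(bits[::-1], 2) if bits else 0
-- ===== Notes on version B (the rewrite author's own statement) =====
-- stated objective: idiomatic
-- what changed: B builds the whole bit string ('1' for '#', '0' otherwise) in row-major order, reverses it and parses it with int(bits, 2) instead of accumulating powers of two in a running sum with an explicit index counter.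
import Mathlib
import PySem

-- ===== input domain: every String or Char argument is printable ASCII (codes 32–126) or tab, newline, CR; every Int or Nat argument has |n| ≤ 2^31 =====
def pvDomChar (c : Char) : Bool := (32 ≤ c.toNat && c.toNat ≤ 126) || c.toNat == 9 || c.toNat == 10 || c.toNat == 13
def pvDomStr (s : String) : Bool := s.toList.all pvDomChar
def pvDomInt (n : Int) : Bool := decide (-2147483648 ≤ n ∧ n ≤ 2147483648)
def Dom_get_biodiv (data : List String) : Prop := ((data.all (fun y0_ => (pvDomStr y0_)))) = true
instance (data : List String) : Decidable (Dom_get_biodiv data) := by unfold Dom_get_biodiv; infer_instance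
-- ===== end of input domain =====

-- B builds the whole bit string in row-major order, reverses it and parses it as binary,
-- instead of A's running sum of powers of two with an explicit index counter (objective: idiomatic).

-- ===== PORT A =====
-- state = (index, res); 'res += 2 ** index' with index always ≥ 0: 2 ** index = 1 <<< index.toNat (exact; kernel-fast)
def get_biodiv (data : List String) : Int :=
  (data.foldl (fun (st : Int × Int) line =>
    line.toList.foldl (fun (st : Int × Int) c =>
      (st.1 + 1, if c = '#' then st.2 + (1 <<< st.1.toNat : Int) else st.2)) st) (0, 0)).2

-- ===== PORT B =====
-- bits[::-1] ported as List.reverse; int(bits, 2) ported as the left-to-right binary parse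
def get_biodiv_alt (data : List String) : Int :=
  let bits : List Char :=
    (data.map String.toList).flatten.map (fun c => if c = '#' then '1' else '0')
  if bits = [] then 0
  else bits.reverse.foldl (fun acc c => acc * 2 + (if c = '1' then 1 else 0)) 0

-- ===== PRECONDITION & SPEC =====
def Spec_get_biodiv (data : List String) (out : Int) : Prop := out = get_biodiv_alt data
instance (data : List String) (out : Int) : Decidable (Spec_get_biodiv data out) := by unfold Spec_get_biodiv; infer_instance

-- ===== CLAIM (what is proved, stated in full; the proofs are below) =====
def Claim_equal_get_biodiv : Prop := ∀ (data : List String), Dom_get_biodiv data → Spec_get_biodiv data (get_biodiv data)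

-- ===== LEMMAS AND PROOFS =====

-- the little-endian value of a character list: first char is the LSB, '#' counts as 1
def pvVal : List Char → Int
  | [] => 0
  | c :: cs => (if c = '#' then 1 else 0) + 2 * pvVal cs

-- B's binary parser
def pvParse (l : List Char) : Int :=
  l.foldl (fun acc c => acc * 2 + (if c = '1' then 1 else 0)) 0

lemma pvParse_concat (l : List Char) (a : Int) (c : Char) :
    (l ++ [c]).foldl (fun acc c => acc * 2 + (if c = '1' then 1 else 0)) a
      = (l.foldl (fun acc c => acc * 2 + (if c = '1' then 1 else 0)) a) * 2
        + (if c = '1' then 1 else 0) := by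
  simp [List.foldl_append]

lemma pvParse_rev_bits (l : List Char) :
    pvParse ((l.map (fun c => if c = '#' then '1' else '0')).reverse) = pvVal l := by
  induction l with
  | nil => simp [pvParse, pvVal]
  | cons c cs ih =>
      simp only [List.map_cons, List.reverse_cons, pvParse, pvParse_concat] at *
      rw [ih]
      by_cases h : c = '#' <;> simp [pvVal, h] <;> ring

-- A's inner loop over a char list, characterised
lemma pvShift (n : Nat) : (((1 <<< n : Nat) : Int)) = 2 ^ n := by
  rw [Nat.one_shiftLeft]; push_cast; ring

lemma pvA_chars (l : List Char) (i : Nat) (r : Int) :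
    l.foldl (fun (st : Int × Int) c =>
      (st.1 + 1, if c = '#' then st.2 + (1 <<< st.1.toNat : Int) else st.2)) ((i : Int), r)
      = ((i : Int) + l.length, r + 2 ^ i * pvVal l) := by
  induction l generalizing i r with
  | nil => simp [pvVal]
  | cons c cs ih =>
      simp only [List.foldl_cons]
      have h1 : ((i : Int) + 1) = ((i + 1 : Nat) : Int) := by push_cast; ring
      have h2 : ((i : Int)).toNat = i := by simp
      rw [h2, h1, pvShift, ih]
      by_cases h : c = '#' <;>
        · simp [h, pvVal, pow_succ]
          constructor
          · ring
          · ring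

lemma pvA_flatten (data : List String) :
    get_biodiv data
      = ((((data.map String.toList).flatten.length : Nat) : Int),
          pvVal (data.map String.toList).flatten).2 := by
  unfold get_biodiv
  rw [show (data.foldl (fun (st : Int × Int) line =>
        line.toList.foldl (fun (st : Int × Int) c =>
          (st.1 + 1, if c = '#' then st.2 + (1 <<< st.1.toNat : Int) else st.2)) st) (0, 0))
      = ((data.map String.toList).flatten.foldl (fun (st : Int × Int) c =>
          (st.1 + 1, if c = '#' then st.2 + (1 <<< st.1.toNat : Int) else st.2)) (0, 0)) from ?_]
  · have := pvA_chars (data.map String.toList).flatten 0 0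
    simp only [Nat.cast_zero] at this
    rw [this]; simp
  · rw [List.foldl_flatten, List.foldl_map]

-- ===== VERDICT (by name: the statement is the Claim_ definition above) =====
theorem get_biodiv_spec : Claim_equal_get_biodiv := by
  intro data _
  unfold Spec_get_biodiv get_biodiv_alt
  rw [pvA_flatten]
  simp only []
  by_cases h : ((data.map String.toList).flatten.map (fun c => if c = '#' then '1' else '0')) = []
  · rw [if_pos h]
    rcases List.map_eq_nil_iff.mp h with h'
    simp [h', pvVal]
  · rw [if_neg h]
    exact (pvParse_rev_bits _).symm
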